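-- pv_equiv track=rewrite | github.com/sigilwig44/AdventOfCode23 | advent_day14.py | roll_stones
-- ===== SOURCE A (Python) =====
-- def roll_stones(col):
--     col = col[:]
--     # Loop through the list
--     for i in range(len(col)):
--         # Check if the current element is 'O'
--         if col[i] == 'O':
--             # Check if the space to the left is not '#'
--             j = i
--             while j - 1 >= 0 and (col[j - 1] != '#'):
--                 # Move the 'O' to the left by swapping
--                 col[j], col[j - 1] = col[j - 1], col[j]
--                 j -= 1
--     return col
-- ===== SOURCE B (Python) =====
-- def roll_stones(col):
--     # one pass: within each '#'-delimited segment, 'O's pack to the left,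
--     # the other elements keep their relative order after them.
--     res = []
--     o = 0
--     rest = []
--     for x in col:
--         if x == '#':
--             res += ['O'] * o
--             res += rest
--             res.append('#')
--             o = 0
--             rest = []
--         elif x == 'O':
--             o += 1
--         else:
--             rest.append(x)
--     res += ['O'] * o
--     res += rest
--     return res
-- ===== Notes on version B (the rewrite author's own statement) =====
-- stated objective: alternative
-- what changed: Replaces the per-stone leftward bubbling (outer index loop with an inner swap loop) with a single left-to-right pass that counts 'O's and buffers the other elements per '#'-delimited segment, emitting each segment in one piece.
import Mathlib
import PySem

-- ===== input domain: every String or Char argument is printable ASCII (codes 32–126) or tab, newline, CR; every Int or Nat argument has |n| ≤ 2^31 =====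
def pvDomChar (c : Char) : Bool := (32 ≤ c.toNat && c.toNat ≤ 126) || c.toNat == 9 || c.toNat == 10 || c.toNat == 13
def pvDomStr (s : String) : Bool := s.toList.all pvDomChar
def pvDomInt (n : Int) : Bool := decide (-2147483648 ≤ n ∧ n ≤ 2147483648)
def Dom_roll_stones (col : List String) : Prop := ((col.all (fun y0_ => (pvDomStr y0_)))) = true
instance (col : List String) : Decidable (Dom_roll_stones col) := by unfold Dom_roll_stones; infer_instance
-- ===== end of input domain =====

-- B replaces A's per-stone leftward bubbling (nested loops) with a single left-to-right
-- pass that counts 'O's and buffers the other elements per '#'-delimited segment.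

-- ===== PORT A =====
-- Python tuple swap col[j], col[j-1] = col[j-1], col[j] (indices always in range here,
-- so getD's default is never used)
def pvSwapAt (c : List String) (j : Nat) : List String :=
  (c.set (j - 1) (c.getD j "")).set j (c.getD (j - 1) "")

-- the inner while loop: while j - 1 >= 0 and col[j-1] != '#': swap; j -= 1
def pvBubble (c : List String) (j : Nat) : List String :=
  if 1 ≤ j ∧ c.getD (j - 1) "" ≠ "#" then pvBubble (pvSwapAt c j) (j - 1) else c
termination_by j
decreasing_by omega

def roll_stones (col : List String) : List String :=
  (List.range col.length).foldl
    (fun c i => if c.getD i "" = "O" then pvBubble c i else c) col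

-- ===== PORT B =====
-- one pass: per '#'-delimited segment count the 'O's and buffer the other elements
def pvStep (s : List String × Nat × List String) (x : String) :
    List String × Nat × List String :=
  if x = "#" then (s.1 ++ List.replicate s.2.1 "O" ++ s.2.2 ++ ["#"], 0, [])
  else if x = "O" then (s.1, s.2.1 + 1, s.2.2)
  else (s.1, s.2.1, s.2.2 ++ [x])

def roll_stones_alt (col : List String) : List String :=
  let s := col.foldl pvStep ([], 0, [])
  s.1 ++ List.replicate s.2.1 "O" ++ s.2.2

-- ===== PRECONDITION & SPEC =====
def Spec_roll_stones (col : List String) (out : List String) : Prop := out = roll_stones_alt col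
instance (col : List String) (out : List String) : Decidable (Spec_roll_stones col out) := by unfold Spec_roll_stones; infer_instance

-- ===== CLAIM (what is proved, stated in full; the proofs are below) =====
def Claim_equal_roll_stones : Prop := ∀ (col : List String), Dom_roll_stones col → Spec_roll_stones col (roll_stones col)

-- ===== LEMMAS AND PROOFS =====

theorem pv_getD_append_len (L t : List String) (x : String) :
    (L ++ x :: t).getD L.length "" = x := by
  simp [List.getD, List.getElem?_append_right (Nat.le_refl L.length)]

theorem pv_set_append_len (L t : List String) (x v : String) :
    (L ++ x :: t).set L.length v = L ++ v :: t := by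
  induction L with
  | nil => simp
  | cons a L ih => simp [ih]

theorem pv_swap_eq (L t : List String) (x y : String) :
    pvSwapAt (L ++ x :: y :: t) (L.length + 1) = L ++ y :: x :: t := by
  unfold pvSwapAt
  have h1 : (L ++ x :: y :: t).getD (L.length + 1 - 1) "" = x := by
    simpa using pv_getD_append_len L (y :: t) x
  have h2 : (L ++ x :: y :: t).getD (L.length + 1) "" = y := by
    have := pv_getD_append_len (L ++ [x]) t y
    simpa [List.append_assoc] using this
  rw [h1, h2]
  have h3 : (L ++ x :: y :: t).set (L.length + 1 - 1) y = L ++ y :: y :: t := by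
    simpa using pv_set_append_len L (y :: t) x y
  rw [h3]
  have h4 := pv_set_append_len (L ++ [y]) t y x
  simpa [List.append_assoc] using h4

-- shape of a B-state prefix: empty or ending in '#'
def pvEndsHash (r : List String) : Prop := r = [] ∨ ∃ r', r = r' ++ ["#"]

theorem pv_bubble_eq (d : List String) : ∀ (p t : List String), "#" ∉ d → pvEndsHash p →
    pvBubble (p ++ d ++ "O" :: t) (p.length + d.length) = p ++ "O" :: (d ++ t) := by
  induction d using List.reverseRecOn with
  | nil =>
    intro p t _ hp
    rcases hp with rfl | ⟨p', rfl⟩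
    · rw [pvBubble]; simp
    · rw [pvBubble]
      have : (p' ++ ["#"] ++ "O" :: t).getD ((p' ++ ["#"]).length - 1) "" = "#" := by
        simpa [List.append_assoc] using pv_getD_append_len p' ("O" :: t) "#"
      simp [this]
  | append_singleton d' y ih =>
    intro p t hmem hp
    have hy : y ≠ "#" := by simp at hmem; tauto
    have hd' : "#" ∉ d' := by simp at hmem; tauto
    rw [pvBubble]
    have e1 : p ++ (d' ++ [y]) ++ "O" :: t = (p ++ d') ++ y :: "O" :: t := by
      simp [List.append_assoc]
    have e2 : p.length + (d' ++ [y]).length = (p ++ d').length + 1 := by simp; omega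
    have hget : ((p ++ d') ++ y :: "O" :: t).getD ((p ++ d').length + 1 - 1) "" = y := by
      simpa using pv_getD_append_len (p ++ d') ("O" :: t) y
    rw [e1, e2]
    rw [if_pos ⟨Nat.le_add_left 1 _, by rw [hget]; exact hy⟩]
    rw [pv_swap_eq (p ++ d') t y "O"]
    have e3 : (p ++ d') ++ "O" :: y :: t = p ++ d' ++ "O" :: (y :: t) := by
      simp [List.append_assoc]
    have e4 : (p ++ d').length + 1 - 1 = p.length + d'.length := by simp
    rw [e3, e4, ih p (y :: t) hd' hp]
    simp

theorem pv_main (ys : List String) : ∀ (r t : List String) (o : Nat),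
    pvEndsHash r → "#" ∉ t →
    (List.range' (r.length + o + t.length) ys.length).foldl
      (fun c i => if c.getD i "" = "O" then pvBubble c i else c)
      (r ++ List.replicate o "O" ++ t ++ ys)
    = (let s := ys.foldl pvStep (r, o, t); s.1 ++ List.replicate s.2.1 "O" ++ s.2.2) := by
  induction ys with
  | nil =>
    intro r t o _ _
    simp only [List.length_nil, List.range'_zero, List.foldl_nil, List.append_nil]
  | cons y ys ih =>
    intro r t o hr ht
    have hlenL : (r ++ List.replicate o "O" ++ t).length = r.length + o + t.length := by
      simp only [List.length_append, List.length_replicate]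
    have hget : (r ++ List.replicate o "O" ++ t ++ y :: ys).getD (r.length + o + t.length) "" = y := by
      have := pv_getD_append_len (r ++ List.replicate o "O" ++ t) ys y
      rw [hlenL] at this
      simpa [List.append_assoc] using this
    simp only [List.length_cons]
    rw [List.range'_succ, List.foldl_cons]
    by_cases hOh : y = "#"
    · subst hOh
      rw [if_neg (by rw [hget]; decide)]
      have hstep : pvStep (r, o, t) "#" = (r ++ List.replicate o "O" ++ t ++ ["#"], 0, []) := by
        simp [pvStep]
      have hrec := ih (r ++ List.replicate o "O" ++ t ++ ["#"]) [] 0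
        (Or.inr ⟨r ++ List.replicate o "O" ++ t, rfl⟩) (by simp)
      simp only [List.foldl_cons, hstep]
      rw [← hrec]
      have e1 : r.length + o + t.length + 1
          = (r ++ List.replicate o "O" ++ t ++ ["#"]).length + 0 + List.length ([] : List String) := by
        simp only [List.length_append, List.length_replicate, List.length_cons, List.length_nil]
      have e2 : r ++ List.replicate o "O" ++ t ++ "#" :: ys
          = r ++ List.replicate o "O" ++ t ++ ["#"] ++ List.replicate 0 "O" ++ [] ++ ys := by
        simp
      rw [e1, e2]
    · by_cases hO : y = "O"
      · subst hO
        rw [if_pos hget]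
        have hmem : "#" ∉ List.replicate o "O" ++ t := by
          intro hmem
          rcases List.mem_append.mp hmem with h | h
          · exact absurd (List.eq_of_mem_replicate h) (by decide)
          · exact ht h
        have hbub := pv_bubble_eq (List.replicate o "O" ++ t) r ys hmem hr
        have e0 : r ++ (List.replicate o "O" ++ t) ++ "O" :: ys
            = r ++ List.replicate o "O" ++ t ++ "O" :: ys := by
          simp
        have e0' : r.length + (List.replicate o "O" ++ t).length = r.length + o + t.length := by
          simp; omega
        rw [e0, e0'] at hbub
        rw [hbub]
        have hstep : pvStep (r, o, t) "O" = (r, o + 1, t) := by simp [pvStep]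
        have hrec := ih r t (o + 1) hr ht
        simp only [List.foldl_cons, hstep]
        rw [← hrec]
        have e1 : r.length + o + t.length + 1 = r.length + (o + 1) + t.length := by omega
        have e2 : r ++ "O" :: (List.replicate o "O" ++ t ++ ys)
            = r ++ List.replicate (o + 1) "O" ++ t ++ ys := by
          simp [List.replicate_succ]
        rw [e1, e2]
      · rw [if_neg (by rw [hget]; exact hO)]
        have hstep : pvStep (r, o, t) y = (r, o, t ++ [y]) := by
          simp [pvStep, hOh, hO]
        have ht' : "#" ∉ t ++ [y] := by
          intro hmem
          rcases List.mem_append.mp hmem with h | h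
          · exact ht h
          · simp at h; exact hOh h.symm
        have hrec := ih r (t ++ [y]) o hr ht'
        simp only [List.foldl_cons, hstep]
        rw [← hrec]
        have e1 : r.length + o + t.length + 1 = r.length + o + (t ++ [y]).length := by
          simp only [List.length_append, List.length_cons, List.length_nil]
          omega
        have e2 : r ++ List.replicate o "O" ++ t ++ y :: ys
            = r ++ List.replicate o "O" ++ (t ++ [y]) ++ ys := by
          simp
        rw [e1, e2]

-- ===== VERDICT (by name: the statement is the Claim_ definition above) =====
theorem roll_stones_spec : Claim_equal_roll_stones := by
  intro col _
  unfold Spec_roll_stones roll_stones roll_stones_alt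
  have h := pv_main col [] [] 0 (Or.inl rfl) (by simp)
  simpa [List.range_eq_range'] using h
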